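-- pv_equiv track=rewrite | github.com/Dev-Eyitayo/UniScheduL | backend/app.py | format_schedule_for_pdf
-- ===== SOURCE A (Python) =====
-- def format_schedule_for_pdf(bookings, failed_bookings):
--     week_days = ["Monday", "Tuesday", "Wednesday", "Thursday", "Friday"]
--
--     # Sort bookings first by day, then by time
--     sorted_bookings = sorted(bookings, key=lambda x: (week_days.index(x["day"]), x["start_time"]))
--
--     # Organize bookings by day
--     schedule_by_day = {day: [] for day in week_days}
--     for booking in sorted_bookings:
--         schedule_by_day[booking["day"]].append(
--             f"🔹 {booking['start_time']} - {booking['end_time']}: {booking['course_name']} "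
--             f"in {booking['room']} by Lecturer {booking.get('lecturer', 'Unknown')}"
--         )
--
--     # Organize failed bookings
--     formatted_failed_bookings = [f"❌ {failure}" for failure in failed_bookings]
--
--     return schedule_by_day, formatted_failed_bookings
-- ===== SOURCE B (Python) =====
-- def format_schedule_for_pdf(bookings, failed_bookings):
--     week_days = ["Monday", "Tuesday", "Wednesday", "Thursday", "Friday"]
--
--     # Bucket each booking by its day in one pass (no global sort, no index() in a sort key)
--     buckets = {day: [] for day in week_days}
--     for booking in bookings:
--         buckets[booking["day"]].append(booking)
--
--     # Sort each day's bucket by start_time (stable), then format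
--     schedule_by_day = {
--         day: [
--             f"🔹 {b['start_time']} - {b['end_time']}: {b['course_name']} "
--             f"in {b['room']} by Lecturer {b.get('lecturer', 'Unknown')}"
--             for b in sorted(day_list, key=lambda x: x["start_time"])
--         ]
--         for day, day_list in buckets.items()
--     }
--
--     return schedule_by_day, [f"❌ {failure}" for failure in failed_bookings]
-- ===== Notes on version B (the rewrite author's own statement) =====
-- stated objective: alternative
-- what changed: Replaces A's single global sort keyed by (week_days.index(day), start_time) with one bucketing pass into per-day lists followed by a stable per-day sort on start_time only.
import Mathlib
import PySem

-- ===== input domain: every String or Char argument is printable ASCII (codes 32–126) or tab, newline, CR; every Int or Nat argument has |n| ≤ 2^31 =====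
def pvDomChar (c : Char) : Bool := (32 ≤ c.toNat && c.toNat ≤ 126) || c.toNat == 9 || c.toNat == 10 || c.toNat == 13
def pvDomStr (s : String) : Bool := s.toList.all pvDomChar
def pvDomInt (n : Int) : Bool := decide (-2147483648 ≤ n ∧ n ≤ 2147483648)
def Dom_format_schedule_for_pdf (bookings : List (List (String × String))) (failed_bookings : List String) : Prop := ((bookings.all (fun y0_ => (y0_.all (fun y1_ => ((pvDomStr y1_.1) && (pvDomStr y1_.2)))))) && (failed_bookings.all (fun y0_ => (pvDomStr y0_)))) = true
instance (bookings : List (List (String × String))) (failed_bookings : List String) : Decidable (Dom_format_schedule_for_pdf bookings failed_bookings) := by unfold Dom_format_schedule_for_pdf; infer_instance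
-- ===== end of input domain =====

-- B replaces A's single global sort keyed by (week_days.index(day), start_time) with one bucketing
-- pass into per-day lists followed by a stable per-day sort on start_time only (objective: alternative).

-- ===== PORT A =====
-- shared helpers: dict[k] / dict.get(k, dflt) on an association list (first match), the f-string, the week list
def pvWdays : List String := ["Monday", "Tuesday", "Wednesday", "Thursday", "Friday"]
def pvGetK (b : List (String × String)) (k : String) : Option String := (b.find? (fun p => p.1 == k)).map (fun p => p.2)
-- booking[k]; the "" default is only reached where Python raises KeyError (excluded by Pre_)
def pvGet (b : List (String × String)) (k : String) : String := (pvGetK b k).getD ""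
-- the f-string both A and B format with (identical in both sources)
def pvFmt (b : List (String × String)) : String :=
  PySem.Str.join "" ["🔹 ", pvGet b "start_time", " - ", pvGet b "end_time", ": ", pvGet b "course_name",
    " in ", pvGet b "room", " by Lecturer ", (pvGetK b "lecturer").getD "Unknown"]
-- week_days.index(booking["day"]); the 0 default is only reached where Python raises ValueError (excluded by Pre_)
def pvDayIdx (b : List (String × String)) : Nat := (PySem.List.index? pvWdays (pvGet b "day")).getD 0

def format_schedule_for_pdf (bookings : List (List (String × String))) (failed_bookings : List String) : (List (String × List String)) × List String :=
  let sorted_bookings := PySem.List.sorted2 bookings (fun x => pvDayIdx x) (fun x => pvGet x "start_time")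
  let schedule0 := pvWdays.foldl (fun d day => d.insert day ([] : List String)) PySem.Dict.empty
  let schedule := sorted_bookings.foldl (fun d b => d.modify (pvGet b "day") [] (fun l => l ++ [pvFmt b])) schedule0
  (schedule.items, failed_bookings.map (fun failure => PySem.Str.join "" ["❌ ", failure]))

-- ===== PORT B =====
def format_schedule_for_pdf_alt (bookings : List (List (String × String))) (failed_bookings : List String) : (List (String × List String)) × List String :=
  let buckets0 := pvWdays.foldl (fun d day => d.insert day ([] : List (List (String × String)))) PySem.Dict.empty
  let buckets := bookings.foldl (fun d b => d.modify (pvGet b "day") [] (fun l => l ++ [b])) buckets0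
  (buckets.items.map (fun kv => (kv.1, (PySem.List.sorted kv.2 (fun x => pvGet x "start_time")).map pvFmt)),
   failed_bookings.map (fun failure => PySem.Str.join "" ["❌ ", failure]))

-- ===== PRECONDITION & SPEC =====
-- Pre_ excludes exactly the inputs where A raises: a booking missing one of the keys
-- "day"/"start_time"/"end_time"/"course_name"/"room" (KeyError) or whose day is not a weekday (ValueError).
def Pre_format_schedule_for_pdf (bookings : List (List (String × String))) (failed_bookings : List String) : Prop :=
  ∀ b ∈ bookings, (pvGetK b "day").isSome ∧ (pvGetK b "start_time").isSome ∧ (pvGetK b "end_time").isSome ∧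
    (pvGetK b "course_name").isSome ∧ (pvGetK b "room").isSome ∧ pvGet b "day" ∈ pvWdays
instance (bookings : List (List (String × String))) (failed_bookings : List String) : Decidable (Pre_format_schedule_for_pdf bookings failed_bookings) := by unfold Pre_format_schedule_for_pdf; infer_instance
def pvWitness_format_schedule_for_pdf : (List (List (String × String))) × List String :=
  ([[("day", "Monday"), ("start_time", "09:00"), ("end_time", "10:00"), ("course_name", "CS101"), ("room", "R1")]], ["clash"])

def Spec_format_schedule_for_pdf (bookings : List (List (String × String))) (failed_bookings : List String) (out : (List (String × List String)) × List String) : Prop := out = format_schedule_for_pdf_alt bookings failed_bookings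
instance (bookings : List (List (String × String))) (failed_bookings : List String) (out : (List (String × List String)) × List String) : Decidable (Spec_format_schedule_for_pdf bookings failed_bookings out) := by unfold Spec_format_schedule_for_pdf; infer_instance

-- ===== CLAIM (what is proved, stated in full; the proofs are below) =====
def Claim_equal_format_schedule_for_pdf : Prop := ∀ (bookings : List (List (String × String))) (failed_bookings : List String), Dom_format_schedule_for_pdf bookings failed_bookings → Pre_format_schedule_for_pdf bookings failed_bookings → Spec_format_schedule_for_pdf bookings failed_bookings (format_schedule_for_pdf bookings failed_bookings)

-- ===== LEMMAS AND PROOFS =====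

-- the comparison sorted2 inserts with (lexicographic on (idx, st)) and the one sorted inserts with (st only)
def pvBef2 {α : Type} (idx : α → Nat) (st : α → String) (a b : α) : Bool :=
  decide (idx a < idx b) || (!decide (idx b < idx a) && decide (st a < st b))
def pvBef1 {α : Type} (st : α → String) (a b : α) : Bool := decide (st a < st b)
def pvLexLe {α : Type} (idx : α → Nat) (st : α → String) (a b : α) : Prop :=
  idx a < idx b ∨ (idx a = idx b ∧ st a ≤ st b)

theorem pvBef2_iff {α : Type} (idx : α → Nat) (st : α → String) (a b : α) :
    pvBef2 idx st a b = true ↔ (idx a < idx b ∨ (¬ idx b < idx a ∧ st a < st b)) := by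
  simp only [pvBef2, Bool.or_eq_true, Bool.and_eq_true, Bool.not_eq_true',
    decide_eq_true_eq, decide_eq_false_iff_not]

theorem pvBef2_false_iff {α : Type} (idx : α → Nat) (st : α → String) (a b : α) :
    pvBef2 idx st a b = false ↔ (¬ idx a < idx b ∧ (idx b < idx a ∨ ¬ st a < st b)) := by
  simp only [pvBef2, Bool.or_eq_false_iff, Bool.and_eq_false_iff, Bool.not_eq_false',
    decide_eq_true_eq, decide_eq_false_iff_not]

theorem pvBef2_le {α : Type} {idx : α → Nat} {st : α → String} {a b : α}
    (h : pvBef2 idx st a b = true) : pvLexLe idx st a b := by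
  rcases (pvBef2_iff idx st a b).mp h with h | ⟨h1, h2⟩
  · exact Or.inl h
  · rcases Nat.lt_or_ge (idx a) (idx b) with g | g
    · exact Or.inl g
    · exact Or.inr ⟨by omega, le_of_lt h2⟩

theorem pvNotBef2_le {α : Type} {idx : α → Nat} {st : α → String} {a b : α}
    (h : pvBef2 idx st a b = false) : pvLexLe idx st b a := by
  rcases (pvBef2_false_iff idx st a b).mp h with ⟨h1, h2⟩
  rcases h2 with hlt | hnst
  · exact Or.inl hlt
  · rcases Nat.lt_or_ge (idx b) (idx a) with g | g
    · exact Or.inl g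
    · exact Or.inr ⟨by omega, le_of_not_gt hnst⟩

theorem pvBef2_trans_le {α : Type} {idx : α → Nat} {st : α → String} {a b c : α}
    (h : pvBef2 idx st a b = true) (h2 : pvLexLe idx st b c) : pvBef2 idx st a c = true := by
  apply (pvBef2_iff idx st a c).mpr
  rcases (pvBef2_iff idx st a b).mp h with h | ⟨h1, hst⟩ <;> rcases h2 with g | ⟨g1, g2⟩
  · exact Or.inl (by omega)
  · exact Or.inl (by omega)
  · exact Or.inl (by omega)
  · exact Or.inr ⟨by omega, lt_of_lt_of_le hst g2⟩

theorem pvInsertBy_pairwise {α : Type} (idx : α → Nat) (st : α → String) (x : α) (acc : List α)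
    (h : acc.Pairwise (pvLexLe idx st)) :
    (PySem.List.insertBy (pvBef2 idx st) x acc).Pairwise (pvLexLe idx st) := by
  induction acc with
  | nil => simp [PySem.List.insertBy]
  | cons y ys ih =>
    rw [List.pairwise_cons] at h
    by_cases hb : pvBef2 idx st x y = true
    · rw [PySem.List.insertBy, if_pos hb]
      refine List.Pairwise.cons ?_ (List.Pairwise.cons h.1 h.2)
      intro z hz
      rcases List.mem_cons.mp hz with rfl | hz
      · exact pvBef2_le hb
      · exact pvBef2_le (pvBef2_trans_le hb (h.1 z hz))
    · rw [PySem.List.insertBy, if_neg hb]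
      refine List.Pairwise.cons ?_ (ih h.2)
      intro z hz
      rcases (PySem.List.mem_insertBy _ _ _ _).mp hz with rfl | hz
      · exact pvNotBef2_le (Bool.eq_false_iff.mpr hb)
      · exact h.1 z hz

theorem pvInsertBy_head {α : Type} (bef : α → α → Bool) (x : α) (m : List α)
    (h : ∀ z ∈ m, bef x z = true) : PySem.List.insertBy bef x m = x :: m := by
  cases m with
  | nil => rfl
  | cons z zs => rw [PySem.List.insertBy, if_pos (h z List.mem_cons_self)]

theorem pvFilter_insertBy {α : Type} (idx : α → Nat) (st : α → String) (p : α → Bool)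
    (hp : ∀ a b, p a = true → p b = true → idx a = idx b) (x : α) (acc : List α)
    (hs : acc.Pairwise (pvLexLe idx st)) :
    (PySem.List.insertBy (pvBef2 idx st) x acc).filter p =
      if p x then PySem.List.insertBy (pvBef1 st) x (acc.filter p) else acc.filter p := by
  induction acc with
  | nil =>
    by_cases hx : p x = true
    · simp [PySem.List.insertBy, hx]
    · simp [PySem.List.insertBy, hx]
  | cons y ys ih =>
    rw [List.pairwise_cons] at hs
    by_cases hb : pvBef2 idx st x y = true
    · rw [PySem.List.insertBy, if_pos hb]
      by_cases hx : p x = true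
      · by_cases hy : p y = true
        · have hix : idx x = idx y := hp x y hx hy
          have hst : st x < st y := by
            rcases (pvBef2_iff idx st x y).mp hb with h | ⟨_, h2⟩
            · omega
            · exact h2
          have hlt : pvBef1 st x y = true := by
            simp only [pvBef1, decide_eq_true_eq]; exact hst
          rw [if_pos hx, List.filter_cons_of_pos hx, List.filter_cons_of_pos hy,
            PySem.List.insertBy, if_pos hlt]
        · rw [if_pos hx, List.filter_cons_of_pos hx, List.filter_cons_of_neg (by simp [hy])]
          have hall : ∀ z ∈ ys.filter p, pvBef1 st x z = true := by
            intro z hz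
            rcases List.mem_filter.mp hz with ⟨hzm, hpz⟩
            have h2 : pvBef2 idx st x z = true := pvBef2_trans_le hb (hs.1 z hzm)
            have hix : idx x = idx z := hp x z hx hpz
            have hst : st x < st z := by
              rcases (pvBef2_iff idx st x z).mp h2 with h | ⟨_, h3⟩
              · omega
              · exact h3
            simp only [pvBef1, decide_eq_true_eq]; exact hst
          rw [pvInsertBy_head _ _ _ hall]
      · rw [if_neg hx, List.filter_cons_of_neg (by simp [hx])]
    · rw [PySem.List.insertBy, if_neg hb]
      have hbf : pvBef2 idx st x y = false := Bool.eq_false_iff.mpr hb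
      by_cases hy : p y = true
      · rw [List.filter_cons_of_pos hy, ih hs.2]
        by_cases hx : p x = true
        · have hix : idx x = idx y := hp x y hx hy
          have hnst : ¬ st x < st y := by
            rcases (pvBef2_false_iff idx st x y).mp hbf with ⟨h1, h2 | h3⟩
            · omega
            · exact h3
          have hlt : pvBef1 st x y = false := by
            simp only [pvBef1, decide_eq_false_iff_not]; exact hnst
          rw [if_pos hx, if_pos hx, List.filter_cons_of_pos hy, PySem.List.insertBy,
            if_neg (by simp [hlt])]
        · rw [if_neg hx, if_neg hx, List.filter_cons_of_pos hy]
      · rw [List.filter_cons_of_neg (by simp [hy]), ih hs.2]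
        by_cases hx : p x = true
        · rw [if_pos hx, if_pos hx, List.filter_cons_of_neg (by simp [hy])]
        · rw [if_neg hx, if_neg hx, List.filter_cons_of_neg (by simp [hy])]

theorem pvFilter_foldl {α : Type} (idx : α → Nat) (st : α → String) (p : α → Bool)
    (hp : ∀ a b, p a = true → p b = true → idx a = idx b) (xs : List α) (acc : List α)
    (hs : acc.Pairwise (pvLexLe idx st)) :
    (xs.foldl (fun a x => PySem.List.insertBy (pvBef2 idx st) x a) acc).filter p =
      (xs.filter p).foldl (fun a x => PySem.List.insertBy (pvBef1 st) x a) (acc.filter p) := by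
  induction xs generalizing acc with
  | nil => simp
  | cons x xs ih =>
    rw [List.foldl_cons, ih _ (pvInsertBy_pairwise idx st x acc hs),
      pvFilter_insertBy idx st p hp x acc hs]
    by_cases hx : p x = true
    · rw [if_pos hx, List.filter_cons_of_pos hx, List.foldl_cons]
    · rw [if_neg hx, List.filter_cons_of_neg (by simp [hx])]

theorem pvFilter_sorted2 {α : Type} (idx : α → Nat) (st : α → String) (p : α → Bool)
    (hp : ∀ a b, p a = true → p b = true → idx a = idx b) (xs : List α) :
    (PySem.List.sorted2 xs (fun x => idx x) (fun x => st x)).filter p =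
      PySem.List.sorted (xs.filter p) (fun x => st x) := by
  rw [PySem.List.sorted_eq_foldl_insertBy]
  have h2 : PySem.List.sorted2 xs (fun x => idx x) (fun x => st x) =
      xs.foldl (fun a x => PySem.List.insertBy (pvBef2 idx st) x a) [] := rfl
  rw [h2]
  exact pvFilter_foldl idx st p hp xs [] List.Pairwise.nil

theorem pvSet_update_of_subset (s l : List String) (h : ∀ x ∈ l, x ∈ s) :
    PySem.Set.update s l = s := by
  rw [PySem.Set.update_eq_append_filter]
  have hnil : (PySem.Set.ofList l).filter (fun y => !(PySem.Set.contains s y)) = [] := by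
    apply List.filter_eq_nil_iff.mpr
    intro y hy
    have hys : y ∈ s := h y ((PySem.Set.mem_ofList l y).mp hy)
    simpa using hys
  rw [hnil, List.append_nil]

-- the shared grouping loop of both ports: initialise a dict over the week days, then modify-append
theorem pvFold_items {ν : Type} (g : List (String × String) → ν) (l : List (List (String × String)))
    (hl : ∀ b ∈ l, pvGet b "day" ∈ pvWdays) :
    (l.foldl (fun d b => d.modify (pvGet b "day") [] (fun v => v ++ [g b]))
        (pvWdays.foldl (fun d day => d.insert day ([] : List ν)) PySem.Dict.empty)).items
      = pvWdays.map (fun day => (day, (l.filter (fun b => pvGet b "day" == day)).map g)) := by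
  set d0 : PySem.Dict String (List ν) :=
    pvWdays.foldl (fun d day => d.insert day ([] : List ν)) PySem.Dict.empty with hd0def
  have hitems0 : d0.items = pvWdays.map (fun day => (day, ([] : List ν))) := by
    rw [hd0def]
    have := PySem.Dict.items_foldl_insert_fresh (l := pvWdays) (k := fun day => day)
      (v := fun _ => ([] : List ν)) (d := PySem.Dict.empty)
      (by intro a _; exact PySem.Dict.contains_empty a) (by decide)
    simpa using this
  have hkeys0 : d0.keys = pvWdays := by
    show d0.items.map Prod.fst = pvWdays
    rw [hitems0, List.map_map]; rfl
  have hkeys : (l.foldl (fun d b => d.modify (pvGet b "day") [] (fun v => v ++ [g b])) d0).keys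
      = pvWdays := by
    rw [PySem.Dict.keys_foldl_modify_key l (fun b => pvGet b "day") [] (fun _ b => fun v => v ++ [g b]),
      hkeys0]
    exact pvSet_update_of_subset _ _ (by
      intro x hx
      rcases List.mem_map.mp hx with ⟨b, hb, rfl⟩
      exact hl b hb)
  have hnodup : (l.foldl (fun d b => d.modify (pvGet b "day") [] (fun v => v ++ [g b])) d0).keys.Nodup := by
    rw [hkeys]; decide
  rw [PySem.Dict.items_eq_map_keys _ hnodup ([] : List ν), hkeys]
  apply List.map_congr_left
  intro day hday
  have hmap : l.foldl (fun d b => d.modify (pvGet b "day") [] (fun v => v ++ [g b])) d0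
      = (l.map (fun b => (pvGet b "day", g b))).foldl
          (fun d (p : String × ν) => d.modify p.1 [] (fun v => v ++ [p.2])) d0 :=
    (List.foldl_map (f := fun b => (pvGet b "day", g b))
      (g := fun d (p : String × ν) => d.modify p.1 [] (fun v => v ++ [p.2])) (l := l) (init := d0)).symm
  have hd0get : d0.getD day [] = [] := by
    apply PySem.Dict.getD_of_mem_items (v := ([] : List ν))
    · rw [hitems0]; exact List.mem_map.mpr ⟨day, hday, rfl⟩
    · rw [hkeys0]; decide
  rw [hmap, PySem.Dict.getD_foldl_modify_append, hd0get, List.nil_append,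
    List.filter_map, List.map_map]
  rfl

-- ===== VERDICT (by name: the statement is the Claim_ definition above) =====
theorem format_schedule_for_pdf_spec : Claim_equal_format_schedule_for_pdf := by
  unfold Claim_equal_format_schedule_for_pdf
  intro bookings failed_bookings _hdom hpre
  unfold Spec_format_schedule_for_pdf
  have hdays : ∀ b ∈ bookings, pvGet b "day" ∈ pvWdays := fun b hb => (hpre b hb).2.2.2.2.2
  have hsdays : ∀ b ∈ PySem.List.sorted2 bookings (fun x => pvDayIdx x) (fun x => pvGet x "start_time"),
      pvGet b "day" ∈ pvWdays := by
    intro b hb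
    exact hdays b ((PySem.List.sorted2_perm _ _ _ _).subset hb)
  have hB := pvFold_items (fun b => b) bookings hdays
  simp only [List.map_id'] at hB
  refine Prod.ext ?_ rfl
  show (List.foldl (fun d b => d.modify (pvGet b "day") [] fun l => l ++ [pvFmt b])
        (List.foldl (fun d day => d.insert day ([] : List String)) PySem.Dict.empty pvWdays)
        (PySem.List.sorted2 bookings (fun x => pvDayIdx x) (fun x => pvGet x "start_time"))).items
      = List.map (fun kv => (kv.1, List.map pvFmt (PySem.List.sorted kv.2 fun x => pvGet x "start_time")))
        (List.foldl (fun d b => d.modify (pvGet b "day") [] fun l => l ++ [b])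
          (List.foldl (fun d day => d.insert day ([] : List (List (String × String)))) PySem.Dict.empty pvWdays)
          bookings).items
  rw [pvFold_items pvFmt _ hsdays, hB, List.map_map]
  apply List.map_congr_left
  intro day _hday
  show (day, ((PySem.List.sorted2 bookings (fun x => pvDayIdx x) (fun x => pvGet x "start_time")).filter
      (fun b => pvGet b "day" == day)).map pvFmt)
    = (day, (PySem.List.sorted (bookings.filter (fun b => pvGet b "day" == day))
        (fun x => pvGet x "start_time")).map pvFmt)
  refine congrArg (Prod.mk day) ?_
  rw [pvFilter_sorted2 pvDayIdx (fun x => pvGet x "start_time") (fun b => pvGet b "day" == day)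
    (by
      intro a b ha hb
      have ha' : pvGet a "day" = day := by simpa using ha
      have hb' : pvGet b "day" = day := by simpa using hb
      unfold pvDayIdx
      rw [ha', hb'])]
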